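-- pv_equiv track=rewrite | github.com/Barkyeongchan/miniproject | src/final/final.py | select_closest_objects_perspective
-- ===== SOURCE A (Python) =====
-- def select_closest_objects_perspective(side_objects, frame_width):
--     """
--     좌우 도로에서 가장 가까운 차량 선택
--     화면 중심 기준 좌/우 구분
--     """
--     left_obj, right_obj = None, None
--     left_max_y, right_max_y = -1, -1
--     center_x = frame_width // 2
--     for x1, y1, x2, y2 in side_objects:
--         obj_cx = (x1 + x2) // 2
--         obj_bottom = y2
--         if obj_cx < center_x and obj_bottom > left_max_y:
--             left_max_y = obj_bottom
--             left_obj = (x1, y1, x2, y2)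
--         elif obj_cx >= center_x and obj_bottom > right_max_y:
--             right_max_y = obj_bottom
--             right_obj = (x1, y1, x2, y2)
--
--     selected = []
--     if left_obj: selected.append(('left', left_obj))
--     if right_obj: selected.append(('right', right_obj))
--     return selected
-- ===== SOURCE B (Python) =====
-- def select_closest_objects_perspective(side_objects, frame_width):
--     # Partition-then-reduce: split visible boxes by center-x, pick each side's
--     # winner with max keyed on the bottom y2 (first maximal wins, like Python max).
--     # A box qualifies only if its bottom y2 >= 0 (on-screen), matching the
--     # original's "bottom must exceed -1" threshold.
--     center_x = frame_width // 2
--     visible = [o for o in side_objects if o[3] >= 0]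
--     left = [o for o in visible if (o[0] + o[2]) // 2 < center_x]
--     right = [o for o in visible if (o[0] + o[2]) // 2 >= center_x]
--     left_obj = max(left, key=lambda o: o[3], default=None)
--     right_obj = max(right, key=lambda o: o[3], default=None)
--     selected = []
--     if left_obj is not None:
--         selected.append(('left', left_obj))
--     if right_obj is not None:
--         selected.append(('right', right_obj))
--     return selected
-- ===== Notes on version B (the rewrite author's own statement) =====
-- stated objective: simpler
-- what changed: Replaces the interleaved four-variable accumulator loop by a filter-then-reduce decomposition: keep on-screen boxes (bottom y2 >= 0, the original's -1 threshold), partition them by center-x, and pick each side's winner with max keyed on y2 (first maximal element, matching the strict-update tie-break).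
import Mathlib
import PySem

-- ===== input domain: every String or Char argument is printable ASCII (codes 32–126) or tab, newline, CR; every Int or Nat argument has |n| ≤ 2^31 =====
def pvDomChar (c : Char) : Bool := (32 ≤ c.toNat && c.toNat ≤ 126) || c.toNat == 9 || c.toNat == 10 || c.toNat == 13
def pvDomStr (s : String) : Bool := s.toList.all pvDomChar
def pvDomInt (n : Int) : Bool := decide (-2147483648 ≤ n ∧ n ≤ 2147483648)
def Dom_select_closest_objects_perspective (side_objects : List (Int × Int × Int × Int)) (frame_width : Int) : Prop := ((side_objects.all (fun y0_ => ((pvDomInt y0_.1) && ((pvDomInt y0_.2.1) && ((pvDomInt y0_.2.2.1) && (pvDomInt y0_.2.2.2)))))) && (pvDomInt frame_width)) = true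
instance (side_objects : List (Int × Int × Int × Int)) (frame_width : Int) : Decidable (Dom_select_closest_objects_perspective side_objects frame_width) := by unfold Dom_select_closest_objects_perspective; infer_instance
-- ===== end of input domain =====

-- B replaces A's interleaved four-variable accumulator loop by a partition-then-max
-- decomposition (filter visible boxes, split by center-x, pick each side's first
-- maximal bottom with max); same O(n) cost, simpler shape.

-- ===== PORT A =====
-- the loop body of A's for-loop; state = (left_obj, right_obj, left_max_y, right_max_y)
def pvStepA (center_x : Int)
    (st : Option (Int × Int × Int × Int) × Option (Int × Int × Int × Int) × Int × Int)
    (obj : Int × Int × Int × Int) :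
    Option (Int × Int × Int × Int) × Option (Int × Int × Int × Int) × Int × Int :=
  let obj_cx := PySem.Int.floordiv (obj.1 + obj.2.2.1) 2
  let obj_bottom := obj.2.2.2
  if obj_cx < center_x ∧ obj_bottom > st.2.2.1 then
    (some obj, st.2.1, obj_bottom, st.2.2.2)
  else if obj_cx ≥ center_x ∧ obj_bottom > st.2.2.2 then
    (st.1, some obj, st.2.2.1, obj_bottom)
  else st

def select_closest_objects_perspective (side_objects : List (Int × Int × Int × Int)) (frame_width : Int) : List (String × (Int × Int × Int × Int)) :=
  let center_x := PySem.Int.floordiv frame_width 2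
  let st := side_objects.foldl (pvStepA center_x) (none, none, -1, -1)
  (match st.1 with
   | some o => [("left", o)]
   | none => []) ++
  (match st.2.1 with
   | some o => [("right", o)]
   | none => [])

-- ===== PORT B =====
def select_closest_objects_perspective_alt (side_objects : List (Int × Int × Int × Int)) (frame_width : Int) : List (String × (Int × Int × Int × Int)) :=
  let center_x := PySem.Int.floordiv frame_width 2
  let visible := side_objects.filter (fun o => decide (0 ≤ o.2.2.2))
  let left := visible.filter (fun o => decide (PySem.Int.floordiv (o.1 + o.2.2.1) 2 < center_x))
  let right := visible.filter (fun o => decide (center_x ≤ PySem.Int.floordiv (o.1 + o.2.2.1) 2))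
  let left_obj := PySem.List.max? left (fun o => o.2.2.2)
  let right_obj := PySem.List.max? right (fun o => o.2.2.2)
  (match left_obj with
   | some o => [("left", o)]
   | none => []) ++
  (match right_obj with
   | some o => [("right", o)]
   | none => [])

-- ===== PRECONDITION & SPEC =====
def Spec_select_closest_objects_perspective (side_objects : List (Int × Int × Int × Int)) (frame_width : Int) (out : List (String × (Int × Int × Int × Int))) : Prop := out = select_closest_objects_perspective_alt side_objects frame_width
instance (side_objects : List (Int × Int × Int × Int)) (frame_width : Int) (out : List (String × (Int × Int × Int × Int))) : Decidable (Spec_select_closest_objects_perspective side_objects frame_width out) := by unfold Spec_select_closest_objects_perspective; infer_instance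

-- ===== CLAIM (what is proved, stated in full; the proofs are below) =====
def Claim_equal_select_closest_objects_perspective : Prop := ∀ (side_objects : List (Int × Int × Int × Int)) (frame_width : Int), Dom_select_closest_objects_perspective side_objects frame_width → Spec_select_closest_objects_perspective side_objects frame_width (select_closest_objects_perspective side_objects frame_width)

-- ===== LEMMAS AND PROOFS =====

-- proof-only helper: one side's running-max scan with an explicit threshold
def pvScan (ys : List (Int × Int × Int × Int))
    (st : Option (Int × Int × Int × Int) × Int) :
    Option (Int × Int × Int × Int) × Int :=
  ys.foldl (fun p y => if y.2.2.2 > p.2 then (some y, y.2.2.2) else p) st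

theorem pvScan_cons (y : Int × Int × Int × Int) (ys : List (Int × Int × Int × Int))
    (o : Option (Int × Int × Int × Int)) (m : Int) :
    pvScan (y :: ys) (o, m) = pvScan ys (if y.2.2.2 > m then (some y, y.2.2.2) else (o, m)) := rfl

-- A's fold splits into two independent scans over the two sides
theorem pvFold_split (c : Int) (xs : List (Int × Int × Int × Int)) :
    ∀ (lo ro : Option (Int × Int × Int × Int)) (lm rm : Int),
    xs.foldl (pvStepA c) (lo, ro, lm, rm) =
      ((pvScan (xs.filter (fun o => decide (PySem.Int.floordiv (o.1 + o.2.2.1) 2 < c))) (lo, lm)).1,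
       (pvScan (xs.filter (fun o => !decide (PySem.Int.floordiv (o.1 + o.2.2.1) 2 < c))) (ro, rm)).1,
       (pvScan (xs.filter (fun o => decide (PySem.Int.floordiv (o.1 + o.2.2.1) 2 < c))) (lo, lm)).2,
       (pvScan (xs.filter (fun o => !decide (PySem.Int.floordiv (o.1 + o.2.2.1) 2 < c))) (ro, rm)).2) := by
  induction xs with
  | nil => intro lo ro lm rm; rfl
  | cons x xs ih =>
    intro lo ro lm rm
    rw [List.foldl_cons]
    have hfd : PySem.Int.floordiv (x.1 + x.2.2.1) 2 = (x.1 + x.2.2.1) / 2 :=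
      PySem.Int.floordiv_eq_ediv_of_pos (by norm_num)
    by_cases hcx : PySem.Int.floordiv (x.1 + x.2.2.1) 2 < c
    · have hcx2 : (x.1 + x.2.2.1) / 2 < c := hfd ▸ hcx
      rw [List.filter_cons_of_pos (by simpa using hcx2),
          List.filter_cons_of_neg (by simpa using not_not_intro hcx2),
          pvScan_cons]
      by_cases hy : x.2.2.2 > lm
      · rw [if_pos hy,
            show pvStepA c (lo, ro, lm, rm) x = (some x, ro, x.2.2.2, rm) from by
              simp [pvStepA, hcx2, hy]]
        exact ih (some x) ro x.2.2.2 rm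
      · rw [if_neg hy,
            show pvStepA c (lo, ro, lm, rm) x = (lo, ro, lm, rm) from by
              simp [pvStepA, hy, show ¬ c ≤ (x.1 + x.2.2.1) / 2 from not_le.mpr hcx2]]
        exact ih lo ro lm rm
    · have hcx2 : ¬ (x.1 + x.2.2.1) / 2 < c := hfd ▸ hcx
      rw [List.filter_cons_of_neg (by simpa using hcx2),
          List.filter_cons_of_pos (by simpa using hcx2),
          pvScan_cons]
      by_cases hy : x.2.2.2 > rm
      · rw [if_pos hy,
            show pvStepA c (lo, ro, lm, rm) x = (lo, some x, lm, x.2.2.2) from by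
              simp [pvStepA, hcx2, hy, show c ≤ (x.1 + x.2.2.1) / 2 from not_lt.mp hcx2]]
        exact ih lo (some x) lm x.2.2.2
      · rw [if_neg hy,
            show pvStepA c (lo, ro, lm, rm) x = (lo, ro, lm, rm) from by
              simp [pvStepA, hcx2, hy]]
        exact ih lo ro lm rm

-- starting from a threshold ≥ -1, boxes with negative bottom never win
theorem pvScan_filter_nonneg (ys : List (Int × Int × Int × Int)) :
    ∀ (o : Option (Int × Int × Int × Int)) (m : Int), -1 ≤ m →
    pvScan ys (o, m) = pvScan (ys.filter (fun y => decide (0 ≤ y.2.2.2))) (o, m) := by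
  induction ys with
  | nil => intro o m _; rfl
  | cons y ys ih =>
    intro o m hm
    rw [pvScan_cons]
    by_cases h0 : (0:Int) ≤ y.2.2.2
    · rw [List.filter_cons_of_pos (by simpa using h0), pvScan_cons]
      by_cases hy : y.2.2.2 > m
      · rw [if_pos hy]
        exact ih _ _ (by omega)
      · rw [if_neg hy]
        exact ih _ _ hm
    · have hy : ¬ y.2.2.2 > m := by omega
      rw [if_neg hy, List.filter_cons_of_neg (by simpa using h0)]
      exact ih _ _ hm

-- the scan from a committed winner is exactly max?'s fold from `some o`
theorem pvScan_some_eq (ys : List (Int × Int × Int × Int)) :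
    ∀ (o : Int × Int × Int × Int),
    (pvScan ys (some o, o.2.2.2)).1 =
      ys.foldl (fun acc x =>
        match acc with
        | none => some x
        | some m => if m.2.2.2 < x.2.2.2 then some x else some m) (some o) := by
  induction ys with
  | nil => intro o; rfl
  | cons y ys ih =>
    intro o
    rw [pvScan_cons, List.foldl_cons]
    by_cases hy : y.2.2.2 > o.2.2.2
    · rw [if_pos hy]
      have hm : (if o.2.2.2 < y.2.2.2 then some y else some o) = some y := if_pos hy
      show (pvScan ys (some y, y.2.2.2)).1 = ys.foldl _ (if o.2.2.2 < y.2.2.2 then some y else some o)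
      rw [hm]
      exact ih y
    · rw [if_neg hy]
      have hm : (if o.2.2.2 < y.2.2.2 then some y else some o) = some o := if_neg (by simpa using hy)
      show (pvScan ys (some o, o.2.2.2)).1 = ys.foldl _ (if o.2.2.2 < y.2.2.2 then some y else some o)
      rw [hm]
      exact ih o

-- on a list of nonnegative bottoms, the scan from (none, -1) is Python's max with default None
theorem pvScan_none_eq_max? (ys : List (Int × Int × Int × Int))
    (h : ∀ y ∈ ys, (0:Int) ≤ y.2.2.2) :
    (pvScan ys (none, -1)).1 = PySem.List.max? ys (fun o => o.2.2.2) := by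
  cases ys with
  | nil => rfl
  | cons y ys =>
    have h0 : (0:Int) ≤ y.2.2.2 := h y (by simp)
    rw [pvScan_cons, if_pos (by omega : y.2.2.2 > (-1:Int)), pvScan_some_eq]
    simp only [PySem.List.max?, List.foldl_cons]
    congr 1
    funext acc x
    cases acc <;> rfl

-- ===== VERDICT (by name: the statement is the Claim_ definition above) =====
theorem select_closest_objects_perspective_spec : Claim_equal_select_closest_objects_perspective := by
  intro xs fw _
  unfold Spec_select_closest_objects_perspective
  have hA : select_closest_objects_perspective xs fw =
      (match (xs.foldl (pvStepA (PySem.Int.floordiv fw 2)) (none, none, -1, -1)).1 with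
       | some o => [("left", o)]
       | none => []) ++
      (match (xs.foldl (pvStepA (PySem.Int.floordiv fw 2)) (none, none, -1, -1)).2.1 with
       | some o => [("right", o)]
       | none => []) := rfl
  have hB : select_closest_objects_perspective_alt xs fw =
      (match PySem.List.max? ((xs.filter (fun o => decide (0 ≤ o.2.2.2))).filter
          (fun o => decide (PySem.Int.floordiv (o.1 + o.2.2.1) 2 < PySem.Int.floordiv fw 2))) (fun o => o.2.2.2) with
       | some o => [("left", o)]
       | none => []) ++
      (match PySem.List.max? ((xs.filter (fun o => decide (0 ≤ o.2.2.2))).filter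
          (fun o => decide (PySem.Int.floordiv fw 2 ≤ PySem.Int.floordiv (o.1 + o.2.2.1) 2))) (fun o => o.2.2.2) with
       | some o => [("right", o)]
       | none => []) := rfl
  set c := PySem.Int.floordiv fw 2 with hc
  have hL : (pvScan (xs.filter (fun o => decide (PySem.Int.floordiv (o.1 + o.2.2.1) 2 < c))) (none, -1)).1 =
      PySem.List.max? ((xs.filter (fun o => decide (0 ≤ o.2.2.2))).filter
          (fun o => decide (PySem.Int.floordiv (o.1 + o.2.2.1) 2 < c))) (fun o => o.2.2.2) := by
    rw [pvScan_filter_nonneg _ _ _ (by omega), List.filter_comm]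
    apply pvScan_none_eq_max?
    intro y hy
    simpa using List.of_mem_filter (List.mem_of_mem_filter hy)
  have hR : (pvScan (xs.filter (fun o => !decide (PySem.Int.floordiv (o.1 + o.2.2.1) 2 < c))) (none, -1)).1 =
      PySem.List.max? ((xs.filter (fun o => decide (0 ≤ o.2.2.2))).filter
          (fun o => decide (c ≤ PySem.Int.floordiv (o.1 + o.2.2.1) 2))) (fun o => o.2.2.2) := by
    rw [pvScan_filter_nonneg _ _ _ (by omega), List.filter_comm]
    have hpred : (xs.filter (fun y => decide (0 ≤ y.2.2.2))).filter
          (fun o => !decide (PySem.Int.floordiv (o.1 + o.2.2.1) 2 < c)) =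
        (xs.filter (fun y => decide (0 ≤ y.2.2.2))).filter
          (fun o => decide (c ≤ PySem.Int.floordiv (o.1 + o.2.2.1) 2)) := by
      apply List.filter_congr
      intro x _
      simp [← decide_not]
    rw [hpred]
    apply pvScan_none_eq_max?
    intro y hy
    simpa using List.of_mem_filter (List.mem_of_mem_filter hy)
  rw [hA, hB, pvFold_split c xs none none (-1) (-1)]
  simp only [hL, hR]
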